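-- pv_equiv track=rewrite | github.com/pdyban/driverchallenge | notebooks/Session 3 - Acceleration Feature.py | find_intervals
-- ===== SOURCE A (Python) =====
-- def find_intervals(_tentothirty):
--     """
--     Splits a list of points into connected intervals.
--     Points inside one interval are adjacent to each other.
--     Speed increases along the interval.
--     Intervals are separated by at least one point where speed decreases.
--     """
--     intervals = []
--     pop = []
--     for point in _tentothirty:
--         if len(pop) > 0 and point < pop[-1]:
--             if len(pop) > 3:
--                 intervals.append(pop)
--
--             pop = []
--
--         pop.append(point)
--     if len(pop) > 3:
--         intervals.append(pop)
--
--     return intervals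
-- ===== SOURCE B (Python) =====
-- def find_intervals(_tentothirty):
--     """Boundary-scan re-implementation: find break indices, slice, keep long segments."""
--     pts = list(_tentothirty)
--     n = len(pts)
--     breaks = [i for i in range(1, n) if pts[i] < pts[i - 1]]
--     bounds = [0] + breaks + [n]
--     return [pts[a:b] for a, b in zip(bounds, bounds[1:]) if b - a > 3]
-- ===== Notes on version B (the rewrite author's own statement) =====
-- stated objective: alternative
-- what changed: Instead of A's single fold that grows a current run and flushes it on each decrease, B first computes all break indices (i with pts[i] < pts[i-1]), forms the boundary list, and slices the input into segments, keeping those longer than 3.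
import Mathlib
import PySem

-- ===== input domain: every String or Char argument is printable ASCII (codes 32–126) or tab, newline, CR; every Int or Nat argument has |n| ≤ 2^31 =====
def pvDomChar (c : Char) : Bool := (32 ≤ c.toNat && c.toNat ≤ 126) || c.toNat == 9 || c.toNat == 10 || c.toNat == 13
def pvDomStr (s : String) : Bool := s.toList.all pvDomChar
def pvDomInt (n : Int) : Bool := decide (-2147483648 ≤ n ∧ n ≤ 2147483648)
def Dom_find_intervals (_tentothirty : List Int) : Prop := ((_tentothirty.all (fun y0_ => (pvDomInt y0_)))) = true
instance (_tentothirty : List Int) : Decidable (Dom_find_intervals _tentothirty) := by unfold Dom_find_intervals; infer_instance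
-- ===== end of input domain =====

-- B replaces A's single fold (grow the current run, flush it on each decrease) by a boundary scan:
-- collect the break indices i with pts[i] < pts[i-1], slice the list at those boundaries, keep the
-- segments of length > 3.  Objective: alternative decomposition (same O(n) cost); equal return values.

-- ===== PORT A =====
def find_intervals (_tentothirty : List Int) : List (List Int) :=
  let st := _tentothirty.foldl
    (fun (s : List (List Int) × List Int) (point : Int) =>
      if s.2.length > 0 ∧ point < PySem.List.pyGetD s.2 (-1) 0 then
        ((if s.2.length > 3 then s.1 ++ [s.2] else s.1), [point])
      else
        (s.1, s.2 ++ [point]))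
    ([], [])
  if st.2.length > 3 then st.1 ++ [st.2] else st.1

-- ===== PORT B =====
def find_intervals_alt (_tentothirty : List Int) : List (List Int) :=
  let pts := _tentothirty
  let n : Int := pts.length
  let breaks := (PySem.List.pyRange 1 n 1).filter
    (fun i => decide (PySem.List.pyGetD pts i 0 < PySem.List.pyGetD pts (i - 1) 0))
  let bounds := 0 :: (breaks ++ [n])
  (bounds.zip (PySem.List.slice bounds (some 1) none)).filterMap
    (fun ab => if ab.2 - ab.1 > 3 then some (PySem.List.slice pts (some ab.1) (some ab.2)) else none)

-- ===== PRECONDITION & SPEC =====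
def Spec_find_intervals (_tentothirty : List Int) (out : List (List Int)) : Prop := out = find_intervals_alt _tentothirty
instance (_tentothirty : List Int) (out : List (List Int)) : Decidable (Spec_find_intervals _tentothirty out) := by unfold Spec_find_intervals; infer_instance

-- ===== CLAIM (what is proved, stated in full; the proofs are below) =====
def Claim_equal_find_intervals : Prop := ∀ (_tentothirty : List Int), Dom_find_intervals _tentothirty → Spec_find_intervals _tentothirty (find_intervals _tentothirty)

-- ===== LEMMAS AND PROOFS =====

-- A's loop body and finalization, named for the proofs (definitionally the lambdas in the port).
def stepA (s : List (List Int) × List Int) (point : Int) : List (List Int) × List Int :=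
  if s.2.length > 0 ∧ point < PySem.List.pyGetD s.2 (-1) 0 then
    ((if s.2.length > 3 then s.1 ++ [s.2] else s.1), [point])
  else
    (s.1, s.2 ++ [point])

def finishA (st : List (List Int) × List Int) : List (List Int) :=
  if st.2.length > 3 then st.1 ++ [st.2] else st.1

-- Common intermediate: the maximal non-decreasing runs of the input, given the current run `pop`.
def runsFrom (pop : List Int) : List Int → List (List Int)
  | [] => [pop]
  | x :: xs => if x < pop.getLastD 0 then pop :: runsFrom [x] xs else runsFrom (pop ++ [x]) xs

-- Nat-level break indices: k such that pts[k+1] < pts[k].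
def natBreaks (pts : List Int) : List Nat :=
  (List.range (pts.length - 1)).filter (fun k => decide (pts.getD (k+1) 0 < pts.getD k 0))

-- Nat-level segment builder along a bounds list.
def segsN (pts : List Int) : Nat → List Nat → List (List Int)
  | _, [] => []
  | a, b :: bs => (if b - a > 3 then [(pts.drop a).take (b - a)] else []) ++ segsN pts b bs

theorem getLastD_irrel (l : List Int) (h : l ≠ []) (d d' : Int) : l.getLastD d = l.getLastD d' := by
  rw [List.getLastD_eq_getLast?, List.getLastD_eq_getLast?, List.getLast?_eq_some_getLast h]
  rfl

-- ---- A side ----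

theorem foldA (t : List Int) : ∀ (acc : List (List Int)) (pop : List Int), pop ≠ [] →
    finishA (t.foldl stepA (acc, pop))
      = acc ++ (runsFrom pop t).filter (fun r => r.length > 3) := by
  induction t with
  | nil =>
    intro acc pop _
    by_cases hb : pop.length > 3 <;> simp [finishA, runsFrom, List.filter, hb]
  | cons y t ih =>
    intro acc pop h
    have hlen : 0 < pop.length := List.length_pos_iff.mpr h
    have hlast : PySem.List.pyGetD pop (-1) 0 = pop.getLastD 0 := by
      rw [PySem.List.pyGetD_neg_one (h := h), List.getLastD_eq_getLast?,
        List.getLast?_eq_some_getLast h]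
      rfl
    rw [List.foldl_cons]
    by_cases hc : y < pop.getLastD 0
    · rw [show stepA (acc, pop) y
          = ((if pop.length > 3 then acc ++ [pop] else acc), [y]) by
        simp only [stepA]
        rw [if_pos ⟨hlen, by rw [hlast]; exact hc⟩]]
      rw [ih _ [y] (by simp)]
      simp only [runsFrom, if_pos hc, List.filter_cons]
      by_cases hb : pop.length > 3 <;> simp [hb]
    · rw [show stepA (acc, pop) y = (acc, pop ++ [y]) by
        simp only [stepA]
        rw [if_neg (by rw [hlast]; tauto)]]
      rw [ih acc (pop ++ [y]) (by simp)]
      simp only [runsFrom, if_neg hc]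

theorem find_intervals_eq_runs (x : Int) (t : List Int) :
    find_intervals (x :: t) = (runsFrom [x] t).filter (fun r => r.length > 3) := by
  have h0 : find_intervals (x :: t) = finishA (t.foldl stepA ([], [x])) := rfl
  rw [h0, foldA t [] [x] (by simp), List.nil_append]

-- ---- B side ----

theorem natBreaks_cons (x : Int) (t : List Int) :
    natBreaks (x :: t) = (if t.headD x < x then [0] else []) ++ (natBreaks t).map (· + 1) := by
  cases t with
  | nil => simp [natBreaks]
  | cons z t' =>
    unfold natBreaks
    simp only [List.length_cons, Nat.add_sub_cancel]
    rw [List.range_succ_eq_map, List.filter_cons, List.filter_map]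
    have hfun : ((fun k => decide ((x :: z :: t').getD (k+1) 0 < (x :: z :: t').getD k 0)) ∘ Nat.succ)
        = (fun k => decide ((z :: t').getD (k+1) 0 < (z :: t').getD k 0)) := by
      funext k
      simp
    rw [hfun]
    have hmap : (List.map Nat.succ = List.map (· + 1) (α := Nat)) := by
      funext l
      exact List.map_congr_left (fun a _ => rfl)
    by_cases hzx : z < x <;> simp [hzx, hmap]

theorem natBreaks_append (v : List Int) : ∀ (u : List Int), u ≠ [] → List.IsChain (· ≤ ·) u →
    natBreaks (u ++ v) =
      (if v.headD (u.getLastD 0) < u.getLastD 0 then [u.length - 1] else [])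
        ++ (natBreaks v).map (· + u.length) := by
  intro u
  induction u with
  | nil => intro h; exact absurd rfl h
  | cons x u' ih =>
    intro _ hch
    cases u' with
    | nil =>
      rw [List.singleton_append, natBreaks_cons]
      simp
    | cons w u'' =>
      have hne' : (w :: u'') ≠ [] := by simp
      have hch' : List.IsChain (· ≤ ·) (w :: u'') := (List.isChain_cons.mp hch).2
      have hxw : x ≤ w := (List.isChain_cons.mp hch).1 w rfl
      rw [List.cons_append, natBreaks_cons, ih hne' hch']
      rw [show ((w :: u'') ++ v).headD x = w from rfl, if_neg (by omega)]
      have hlast : (x :: w :: u'').getLastD 0 = (w :: u'').getLastD 0 := by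
        rw [List.getLastD_cons]
        exact getLastD_irrel _ hne' x 0
      rw [hlast, List.nil_append, List.map_append, List.map_map]
      have htail : List.map ((fun k => k + 1) ∘ fun k => k + (w :: u'').length) (natBreaks v)
          = List.map (fun k => k + (x :: w :: u'').length) (natBreaks v) :=
        List.map_congr_left (fun k _ => by simp only [Function.comp_apply, List.length_cons]; omega)
      rw [htail]
      by_cases hcond : v.headD ((w :: u'').getLastD 0) < (w :: u'').getLastD 0
      · rw [if_pos hcond, if_pos hcond]
        simp only [List.map_cons, List.map_nil, List.cons_append, List.nil_append]
        congr 2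
      · rw [if_neg hcond, if_neg hcond]
        simp

theorem natBreaks_of_chain (u : List Int) (h : List.IsChain (· ≤ ·) u) : natBreaks u = [] := by
  cases u with
  | nil => rfl
  | cons x u' =>
    have := natBreaks_append [] (x :: u') (by simp) h
    rw [List.append_nil] at this
    rw [this, if_neg (by rw [List.headD_nil]; exact lt_irrefl _)]
    rfl

theorem segsN_shift (u v : List Int) : ∀ (bs : List Nat) (a : Nat),
    segsN (u ++ v) (a + u.length) (bs.map (· + u.length)) = segsN v a bs := by
  intro bs
  induction bs with
  | nil => intro a; rfl
  | cons b bs ih =>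
    intro a
    simp only [List.map_cons, segsN]
    rw [ih b]
    have h1 : b + u.length - (a + u.length) = b - a := by omega
    have h2 : (u ++ v).drop (a + u.length) = v.drop a := by
      rw [Nat.add_comm a u.length]
      simp [List.drop_append]
    rw [h1, h2]

theorem zip_filterMap_segs (pts : List Int) : ∀ (bs : List Nat) (a : Nat),
    List.IsChain (· ≤ ·) (a :: bs) →
    ((((a : Int) :: bs.map (Nat.cast : Nat → Int)).zip (bs.map (Nat.cast : Nat → Int))).filterMap
      (fun ab => if ab.2 - ab.1 > 3 then some (PySem.List.slice pts (some ab.1) (some ab.2)) else none))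
    = segsN pts a bs := by
  intro bs
  induction bs with
  | nil => intro a _; rfl
  | cons b bs ih =>
    intro a hch
    have hab : a ≤ b := (List.isChain_cons.mp hch).1 b rfl
    have hch' : List.IsChain (· ≤ ·) (b :: bs) := (List.isChain_cons.mp hch).2
    simp only [List.map_cons, List.zip_cons_cons, List.filterMap_cons]
    have hiff : ((b : Int) - (a : Int) > 3) ↔ ((b - a : Nat) > 3) := by omega
    by_cases hbig : (b - a : Nat) > 3
    · rw [if_pos (hiff.mpr hbig)]
      rw [PySem.List.slice_natCast]
      rw [ih b hch']
      simp [segsN, hbig]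
    · rw [if_neg (fun hx => hbig (hiff.mp hx))]
      rw [ih b hch']
      simp [segsN, hbig]

theorem mem_natBreaks_lt (pts : List Int) (k : Nat) (h : k ∈ natBreaks pts) :
    k < pts.length - 1 := by
  unfold natBreaks at h
  exact List.mem_range.mp (List.mem_filter.mp h).1

theorem chain_natBounds (pts : List Int) :
    List.IsChain (· ≤ ·) ((0 : Nat) :: ((natBreaks pts).map (· + 1) ++ [pts.length])) := by
  rw [List.isChain_iff_pairwise]
  constructor
  · intro y _; exact Nat.zero_le y
  · rw [List.pairwise_append]
    refine ⟨?_, List.pairwise_singleton _ _, ?_⟩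
    · unfold natBreaks
      exact List.Pairwise.map _ (fun a b (hab : a < b) => by omega)
        (List.pairwise_lt_range.filter _)
    · intro x hx y hy
      simp only [List.mem_singleton] at hy
      subst hy
      obtain ⟨k, hk, rfl⟩ := List.mem_map.mp hx
      have := mem_natBreaks_lt pts k hk
      omega

theorem alt_eq_segs (pts : List Int) :
    find_intervals_alt pts = segsN pts 0 ((natBreaks pts).map (· + 1) ++ [pts.length]) := by
  have hbr : (PySem.List.pyRange 1 (pts.length : Int) 1).filter
      (fun i => decide (PySem.List.pyGetD pts i 0 < PySem.List.pyGetD pts (i - 1) 0))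
      = ((natBreaks pts).map (· + 1)).map (Nat.cast : Nat → Int) := by
    rw [PySem.List.pyRange_one]
    have htn : ((pts.length : Int) - 1).toNat = pts.length - 1 := by omega
    rw [htn, List.filter_map]
    have hfun : ((fun i => decide (PySem.List.pyGetD pts i 0 < PySem.List.pyGetD pts (i - 1) 0))
        ∘ (fun k : Nat => (1 : Int) + k))
        = (fun k => decide (pts.getD (k+1) 0 < pts.getD k 0)) := by
      funext k
      have h1 : (1 : Int) + (k : Int) = ((k + 1 : Nat) : Int) := by push_cast; ring
      rw [Function.comp_apply, h1]
      simp only [PySem.List.pyGetD_natCast]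
      rw [show ((k + 1 : Nat) : Int) - 1 = ((k : Nat) : Int) by omega]
      simp [PySem.List.pyGetD_natCast]
    rw [hfun]
    unfold natBreaks
    rw [List.map_map]
    exact List.map_congr_left (fun a _ => by simp only [Function.comp_apply]; omega)
  show ((0 :: ((PySem.List.pyRange 1 (pts.length : Int) 1).filter _ ++ [(pts.length : Int)])).zip
      (PySem.List.slice (0 :: ((PySem.List.pyRange 1 (pts.length : Int) 1).filter _ ++ [(pts.length : Int)])) (some 1) none)).filterMap _
      = _
  rw [PySem.List.slice_from_one, hbr]
  have hzip := zip_filterMap_segs pts ((natBreaks pts).map (· + 1) ++ [pts.length]) 0 (chain_natBounds pts)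
  rw [List.map_append] at hzip
  simpa using hzip

-- ---- main induction: boundary slices = long runs ----

theorem segs_eq_runs (t : List Int) : ∀ (pop : List Int), pop ≠ [] → List.IsChain (· ≤ ·) pop →
    segsN (pop ++ t) 0 ((natBreaks (pop ++ t)).map (· + 1) ++ [(pop ++ t).length])
      = (runsFrom pop t).filter (fun r => r.length > 3) := by
  induction t with
  | nil =>
    intro pop hne hch
    rw [List.append_nil, natBreaks_of_chain pop hch]
    simp only [List.map_nil, List.nil_append, segsN, List.drop_zero, Nat.sub_zero,
      List.take_length, runsFrom, List.filter_cons, List.filter_nil]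
    by_cases hb : pop.length > 3 <;> simp [hb]
  | cons y t' ih =>
    intro pop hne hch
    have hlen : 0 < pop.length := List.length_pos_iff.mpr hne
    have hAP := natBreaks_append (y :: t') pop hne hch
    rw [List.headD_cons] at hAP
    by_cases hc : y < pop.getLastD 0
    · rw [hAP, if_pos hc]
      simp only [List.map_cons, List.map_map, List.cons_append, List.nil_append]
      have h1 : pop.length - 1 + 1 = pop.length := by omega
      rw [h1]
      simp only [segsN, Nat.sub_zero, List.drop_zero]
      have htake : (pop ++ y :: t').take pop.length = pop := by simp
      rw [htake]
      have hcomm : ((fun x => x + 1) ∘ (fun x => x + pop.length))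
          = ((fun x => x + pop.length) ∘ (fun x => x + 1)) := by
        funext k; simp; omega
      have hlen2 : (pop ++ y :: t').length = (y :: t').length + pop.length := by
        simp [List.length_append]; omega
      have hrest : (List.map ((fun x => x + 1) ∘ (fun x => x + pop.length)) (natBreaks (y :: t'))
            ++ [(pop ++ y :: t').length])
          = (((natBreaks (y :: t')).map (· + 1) ++ [(y :: t').length]).map (· + pop.length)) := by
        rw [hcomm, ← List.map_map, List.map_append]
        simp [hlen2]
      rw [hrest]
      have hshift := segsN_shift pop (y :: t') ((natBreaks (y :: t')).map (· + 1) ++ [(y :: t').length]) 0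
      rw [Nat.zero_add] at hshift
      rw [hshift]
      have hih := ih [y] (by simp) (List.isChain_singleton y)
      rw [List.singleton_append] at hih
      rw [hih]
      simp only [runsFrom, if_pos hc, List.filter_cons]
      by_cases hb : pop.length > 3 <;> simp [hb]
    · have hassoc : pop ++ y :: t' = (pop ++ [y]) ++ t' := by simp
      have hchy : List.IsChain (· ≤ ·) (pop ++ [y]) := by
        refine hch.append (List.isChain_singleton y) ?_
        intro a ha b hb
        rw [List.getLast?_eq_some_getLast hne] at ha
        simp only [Option.mem_def, Option.some.injEq] at ha
        simp only [List.head?_cons, Option.mem_def, Option.some.injEq] at hb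
        subst ha; subst hb
        have : pop.getLastD 0 = pop.getLast hne := by
          rw [List.getLastD_eq_getLast?, List.getLast?_eq_some_getLast hne]; rfl
        omega
      rw [hassoc, ih (pop ++ [y]) (by simp) hchy]
      simp only [runsFrom, if_neg hc]

-- ===== VERDICT (by name: the statement is the Claim_ definition above) =====
theorem find_intervals_spec : Claim_equal_find_intervals := by
  intro xs _
  show find_intervals xs = find_intervals_alt xs
  cases xs with
  | nil => decide
  | cons x t =>
    rw [find_intervals_eq_runs, alt_eq_segs]
    have h := segs_eq_runs t [x] (by simp) (List.isChain_singleton x)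
    rw [List.singleton_append] at h
    exact h.symm
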